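-- pv_equiv track=rewrite | github.com/cyrii42/advent_of_code | solutions/2017/day01.py | part_one
-- ===== SOURCE A (Python) =====
-- def part_one(data: str):
--     total = 0
--     for i, num_char in enumerate(data):
--         if i == len(data)-1:
--             next_char = data[0]
--         else:
--             next_char = data[i+1]
--
--         if num_char == next_char:
--             total += int(num_char)
--     return total
-- ===== SOURCE B (Python) =====
-- def part_one(data: str):
--     # Run-length encode the string, then score each run in closed form:
--     # a run of k equal characters contributes (k-1)*int(c); the circular
--     # wrap adds int(data[0]) once when the last character equals the first.
--     if not data:
--         return 0
--     runs = []
--     ch, cnt = data[0], 1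
--     for c in data[1:]:
--         if c == ch:
--             cnt += 1
--         else:
--             runs.append((ch, cnt))
--             ch, cnt = c, 1
--     runs.append((ch, cnt))
--     total = sum(int(c) * (k - 1) for c, k in runs if k > 1)
--     if data[-1] == data[0]:
--         total += int(data[0])
--     return total
-- ===== Notes on version B (the rewrite author's own statement) =====
-- stated objective: alternative
-- what changed: Replaces A's per-index lookahead loop by run-length encoding the string and scoring each run in closed form ((k-1)*digit per run of length k, plus one wrap term when the last character equals the first).
import Mathlib
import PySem

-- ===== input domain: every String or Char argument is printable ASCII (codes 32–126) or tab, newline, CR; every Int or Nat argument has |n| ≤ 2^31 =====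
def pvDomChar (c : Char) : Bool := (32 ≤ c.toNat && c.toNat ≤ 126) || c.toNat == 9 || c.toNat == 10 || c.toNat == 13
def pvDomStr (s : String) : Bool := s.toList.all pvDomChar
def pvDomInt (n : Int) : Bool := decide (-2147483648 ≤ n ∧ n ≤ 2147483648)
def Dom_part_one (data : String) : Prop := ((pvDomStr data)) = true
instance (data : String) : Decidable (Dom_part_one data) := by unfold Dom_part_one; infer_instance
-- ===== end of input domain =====

-- B run-length encodes the string and scores each run in closed form instead of A's per-index lookahead loop.

-- shared helper: Python's int(c) on a one-character string (Pre_ guarantees c is a digit, so the default is unreachable)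
def pyIntChar (c : Char) : Int := (PySem.Int.ofStr? (String.ofList [c])).getD 0

-- ===== PORT A =====
def part_one (data : String) : Int :=
  let l := data.toList
  (PySem.List.enumerate l 0).foldl (fun total p =>
    let nextChar := if p.1 = (l.length : Int) - 1 then PySem.List.pyGetD l 0 ' '
                    else PySem.List.pyGetD l (p.1 + 1) ' '
    if p.2 = nextChar then total + pyIntChar p.2 else total) 0

-- ===== PORT B =====
-- one step of B's run-length-encoding loop: state is (current char, current count, finished runs)
def runStep (st : Char × Int × List (Char × Int)) (c : Char) : Char × Int × List (Char × Int) :=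
  if c = st.1 then (st.1, st.2.1 + 1, st.2.2) else (c, 1, st.2.2 ++ [(st.1, st.2.1)])

def part_one_alt (data : String) : Int :=
  let l := data.toList
  if l = [] then 0
  else
    let st := (PySem.List.slice l (some 1) none).foldl runStep (PySem.List.pyGetD l 0 ' ', 1, [])
    let runs := st.2.2 ++ [(st.1, st.2.1)]
    let total := ((runs.filter (fun p => 1 < p.2)).map (fun p => pyIntChar p.1 * (p.2 - 1))).sum
    if PySem.List.pyGetD l (-1) ' ' = PySem.List.pyGetD l 0 ' ' then total + pyIntChar (PySem.List.pyGetD l 0 ' ')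
    else total

-- ===== PRECONDITION & SPEC =====
-- Pre_ excludes exactly the inputs on which A (and B) raise ValueError: a non-digit character equal to its circular successor reaches int().
def Pre_part_one (data : String) : Prop :=
  ∀ p ∈ data.toList.zip (data.toList.drop 1 ++ data.toList.take 1), p.1 = p.2 → p.1.isDigit
instance (data : String) : Decidable (Pre_part_one data) := by unfold Pre_part_one; infer_instance

def pvWitness_part_one : String := "91212129"

def Spec_part_one (data : String) (out : Int) : Prop := out = part_one_alt data
instance (data : String) (out : Int) : Decidable (Spec_part_one data out) := by unfold Spec_part_one; infer_instance

-- ===== CLAIM (what is proved, stated in full; the proofs are below) =====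
def Claim_equal_part_one : Prop := ∀ (data : String), Dom_part_one data → Pre_part_one data → Spec_part_one data (part_one data)

-- ===== LEMMAS AND PROOFS =====

-- value contributed by one adjacent pair
def pairVal (p : Char × Char) : Option Int := if p.1 = p.2 then some (pyIntChar p.1) else none

-- B's closed-form score of a finished run list
def runsVal (runs : List (Char × Int)) : Int :=
  ((runs.filter (fun p => 1 < p.2)).map (fun p => pyIntChar p.1 * (p.2 - 1))).sum

-- the zip of a list with its one-step rotation, expressed through A's indexed lookahead
lemma zip_rot (l : List Char) :
    l.zip (l.drop 1 ++ l.take 1) =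
    (PySem.List.enumerate l 0).map (fun p => (p.2,
      if p.1 = (l.length : Int) - 1 then PySem.List.pyGetD l 0 ' '
      else PySem.List.pyGetD l (p.1 + 1) ' ')) := by
  apply List.ext_getElem
  · simp [PySem.List.length_enumerate]; omega
  · intro k hk1 hk2
    have hk : k < l.length := by
      simpa [PySem.List.length_enumerate] using hk2
    simp only [List.getElem_zip, List.getElem_map, PySem.List.getElem_enumerate, zero_add]
    simp only [Prod.mk.injEq, true_and]
    by_cases hlast : k = l.length - 1
    · have hd : (l.drop 1).length ≤ k := by simp; omega
      rw [List.getElem_append_right hd]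
      have h0 : k - (l.drop 1).length = 0 := by simp; omega
      simp only [h0]
      rw [if_pos (by omega : ((k : Int)) = (l.length : Int) - 1)]
      rw [PySem.List.pyGetD_eq_getElem l ' ' (by omega)
        (by exact_mod_cast (show 0 < l.length by omega))]
      simp [List.getElem_take]
    · have hlt : k < (l.drop 1).length := by simp; omega
      rw [List.getElem_append_left hlt]
      rw [if_neg (by omega : ¬ ((k : Int)) = (l.length : Int) - 1)]
      rw [PySem.List.pyGetD_eq_getElem l ' ' (by omega) (by omega)]
      have ht : (((k : Int)) + 1).toNat = k + 1 := by omega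
      simp only [ht, List.getElem_drop]
      congr 1
      omega

-- folding A's conditional accumulation equals summing the filterMap
lemma foldl_if_sum {α : Type} (q : α → Prop) [DecidablePred q] (v : α → Int)
    (e : List α) (t : Int) :
    e.foldl (fun t x => if q x then t + v x else t) t =
    t + (e.filterMap (fun x => if q x then some (v x) else none)).sum := by
  induction e generalizing t with
  | nil => simp
  | cons x xs ih =>
    by_cases h : q x
    · simp [h, ih]; ring
    · simp [h, ih]

-- A's value is the pair-sum over the one-step rotation
lemma part_one_eq_rotSum (data : String) :
    part_one data = ((data.toList.zip (data.toList.drop 1 ++ data.toList.take 1)).filterMap pairVal).sum := by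
  unfold part_one
  dsimp only
  rw [zip_rot, List.filterMap_map]
  rw [foldl_if_sum (fun p : Int × Char =>
      p.2 = (if p.1 = (data.toList.length : Int) - 1 then PySem.List.pyGetD data.toList 0 ' '
             else PySem.List.pyGetD data.toList (p.1 + 1) ' ')) (fun p => pyIntChar p.2)]
  simp [pairVal]

-- last element of a nonempty list, phrased to recurse structurally (controls unfolding in the proofs)
def lastD (l : List Char) (d : Char) : Char :=
  match l with
  | [] => d
  | c :: cs => lastD cs c

lemma getLast_cons_eq_lastD (l : List Char) : ∀ (a : Char) (h : (a :: l) ≠ []),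
    (a :: l).getLast h = lastD l a := by
  induction l with
  | nil => intro a h; rfl
  | cons c cs ih => intro a h; rw [List.getLast_cons (by simp)]; exact ih c (by simp)

-- splitting off the wrap pair: zip with the rotation = zip with the tail plus the (last, first) pair
lemma zip_last (rest : List Char) : ∀ a b : Char,
    ((a :: rest).zip (rest ++ [b])) = (a :: rest).zip rest ++ [(lastD rest a, b)] := by
  induction rest with
  | nil => intro a b; simp [lastD]
  | cons c cs ih => intro a b; simp [List.zip_cons_cons, ih c b, lastD]

-- appending a run to the finished list adds its closed-form score
lemma runsVal_append (runs : List (Char × Int)) (r : Char × Int) :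
    runsVal (runs ++ [r]) = runsVal runs + (if 1 < r.2 then pyIntChar r.1 * (r.2 - 1) else 0) := by
  by_cases h : 1 < r.2 <;> simp [runsVal, h]

-- loop invariant of B's run-length-encoding fold
lemma runs_fold (rest : List Char) : ∀ (ch : Char) (cnt : Int) (runs : List (Char × Int)), 1 ≤ cnt →
    (let st := rest.foldl runStep (ch, cnt, runs)
     runsVal (st.2.2 ++ [(st.1, st.2.1)]) =
       runsVal (runs ++ [(ch, cnt)]) + (((ch :: rest).zip rest).filterMap pairVal).sum
     ∧ st.1 = lastD rest ch) := by
  induction rest with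
  | nil => intro ch cnt runs h; simp [lastD]
  | cons c cs ih =>
    intro ch cnt runs h
    dsimp only
    by_cases hc : c = ch
    · subst hc
      have H := ih c (cnt + 1) runs (by omega)
      dsimp only at H
      simp only [List.foldl_cons, runStep, if_true]
      refine ⟨?_, by simpa [lastD] using H.2⟩
      rw [H.1, runsVal_append runs (c, cnt + 1), runsVal_append runs (c, cnt)]
      have hpair : pairVal (c, c) = some (pyIntChar c) := by simp [pairVal]
      simp only [List.zip_cons_cons, List.filterMap_cons, hpair, List.sum_cons]
      by_cases h1 : 1 < cnt
      · rw [if_pos (by omega), if_pos h1]; ring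
      · have hcnt : cnt = 1 := by omega
        subst hcnt
        norm_num
        ring
    · have H := ih c 1 (runs ++ [(ch, cnt)]) (by omega)
      dsimp only at H
      simp only [List.foldl_cons, runStep]
      rw [if_neg hc]
      refine ⟨?_, by simpa [lastD] using H.2⟩
      rw [H.1]
      have hpair : pairVal (ch, c) = none := by
        simp only [pairVal]
        rw [if_neg (show ¬ ch = c from fun h => hc h.symm)]
      simp only [List.zip_cons_cons, List.filterMap_cons, hpair]
      rw [runsVal_append (runs ++ [(ch, cnt)]) (c, 1)]
      simp

-- ===== VERDICT (by name: the statement is the Claim_ definition above) =====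
theorem part_one_spec : Claim_equal_part_one := by
  intro data _ _
  unfold Spec_part_one
  rw [part_one_eq_rotSum]
  cases hl : data.toList with
  | nil => unfold part_one_alt; rw [hl]; simp
  | cons c0 rest =>
    unfold part_one_alt
    rw [hl]
    rw [if_neg (List.cons_ne_nil c0 rest), PySem.List.pyGetD_zero_cons]
    dsimp only [letFun]
    have hslice : PySem.List.slice (c0 :: rest) (some 1) none = rest := by
      rw [PySem.List.slice_from_one]; rfl
    rw [hslice]
    have key := (runs_fold rest c0 1 [] (le_refl 1)).1
    simp only [runsVal] at key
    rw [key]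
    have hwrap : PySem.List.pyGetD (c0 :: rest) (-1) ' ' = lastD rest c0 := by
      rw [PySem.List.pyGetD_neg_one (c0 :: rest) ' ' (by simp)]
      exact getLast_cons_eq_lastD rest c0 (by simp)
    rw [hwrap]
    have hdrop : (c0 :: rest).drop 1 = rest := rfl
    have htake : (c0 :: rest).take 1 = [c0] := rfl
    rw [hdrop, htake, zip_last rest c0 c0]
    rw [List.filterMap_append, List.sum_append]
    by_cases hw : lastD rest c0 = c0
    · simp [pairVal, hw]
    · simp [pairVal, hw]
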